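-- pv_equiv track=rewrite | github.com/Kangjinwoojwk/algorithm | programmers/line_2020_1.py | solution
-- ===== SOURCE A (Python) =====
-- def solution(boxes):
--     answer = len(boxes)
--     product = [False] * 1000001
--     for i in boxes:
--         for j in i:
--             if not product[j]:
--                 product[j] = True
--             else:
--                 answer -= 1
--                 product[j] = False
--     return answer
-- ===== SOURCE B (Python) =====
-- def solution(boxes):
--     flat = sorted(x for box in boxes for x in box)
--     pairs = 0
--     i = 0
--     while i + 1 < len(flat):
--         if flat[i] == flat[i + 1]:
--             pairs += 1
--             i += 2
--         else:
--             i += 1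
--     return len(boxes) - pairs
-- ===== Notes on version B (the rewrite author's own statement) =====
-- stated objective: alternative
-- what changed: Replaces the million-entry boolean toggle array with sort-then-scan: flatten and sort all labels, then a single adjacent-pair sweep over the sorted list (consuming two equal neighbours per pair) and return len(boxes) minus the number of pairs found; no marker state per label is kept.
-- intended difference: On inputs where some label x >= 0 and the label x-1000001 both occur an odd number of times, A returns a smaller answer because Python's negative indexing makes product[x-1000001] alias product[x] so the two labels are paired jointly, while B pairs each label only with equal labels, which is the intended per-label pairing. — e.g. on solution([[1000000], [-1]]): A returns 1, B returns 2
import Mathlib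
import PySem

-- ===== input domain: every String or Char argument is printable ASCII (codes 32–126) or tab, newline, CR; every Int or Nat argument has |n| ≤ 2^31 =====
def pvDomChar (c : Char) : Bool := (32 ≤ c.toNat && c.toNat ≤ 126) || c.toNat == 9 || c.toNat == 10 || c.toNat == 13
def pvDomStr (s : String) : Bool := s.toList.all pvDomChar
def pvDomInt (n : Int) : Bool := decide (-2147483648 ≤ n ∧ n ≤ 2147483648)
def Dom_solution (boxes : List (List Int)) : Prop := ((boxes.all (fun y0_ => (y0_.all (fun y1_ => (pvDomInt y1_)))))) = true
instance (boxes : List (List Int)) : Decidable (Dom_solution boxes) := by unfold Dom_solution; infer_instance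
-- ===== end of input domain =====

-- B replaces A's million-entry boolean toggle array by sort-then-scan: flatten and sort the
-- labels, then one adjacent-pair sweep over the sorted list counts the pairs: alternative.

-- ===== PORT A =====
-- A's list 'product = [False] * 1000001' is represented by its characteristic function
-- Int → Bool; 'product[j]' follows Python's indexing rule exactly on in-range indices:
-- a negative j counts from the end, i.e. reads/writes position j + 1000001.
-- (Out-of-range j raises IndexError in Python; Pre_solution excludes those inputs.)
def solutionStep (st : Int × (Int → Bool)) (j : Int) : Int × (Int → Bool) :=
  let idx := if j < 0 then j + 1000001 else j
  if st.2 idx = false then (st.1, fun r => if r = idx then true else st.2 r)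
  else (st.1 - 1, fun r => if r = idx then false else st.2 r)

def solution (boxes : List (List Int)) : Int :=
  (boxes.foldl (fun st i => i.foldl solutionStep st) ((boxes.length : Int), fun _ => false)).1

-- ===== PORT B =====
-- Source B's while loop over indices i (step 2 on an adjacent equal pair, step 1 otherwise)
-- is the obvious structural recursion on the sorted list: exact.
def pairsScan : List Int → Nat
  | [] => 0
  | [_] => 0
  | a :: b :: t => if a = b then 1 + pairsScan t else pairsScan (b :: t)

def solution_alt (boxes : List (List Int)) : Int :=
  let flat := PySem.List.sorted boxes.flatten (fun x => x) false
  (boxes.length : Int) - (pairsScan flat : Int)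

-- ===== PRECONDITION & SPEC =====
-- Pre_: exactly the inputs on which A returns normally: every label must be a valid
-- (possibly negative) Python index into the 1000001-element list; otherwise A raises IndexError.
def Pre_solution (boxes : List (List Int)) : Prop :=
  ∀ b ∈ boxes, ∀ x ∈ b, -1000001 ≤ x ∧ x ≤ 1000000
instance (boxes : List (List Int)) : Decidable (Pre_solution boxes) := by
  unfold Pre_solution; infer_instance
def pvWitness_solution : List (List Int) := [[1, 2], [1]]

-- On inputs where some label x ≥ 0 and the label x - 1000001 both occur an odd number of
-- times, A returns a smaller answer because Python's negative indexing makes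
-- product[x-1000001] alias product[x] so the two labels are paired jointly, while B pairs
-- each label only with equal labels, which is the intended per-label pairing.
def D_solution (boxes : List (List Int)) : Prop :=
  ∃ x ∈ boxes.flatten, 0 ≤ x ∧ (boxes.flatten.count x) % 2 = 1 ∧
    (boxes.flatten.count (x - 1000001)) % 2 = 1
instance (boxes : List (List Int)) : Decidable (D_solution boxes) := by
  unfold D_solution; infer_instance

def Spec_solution (boxes : List (List Int)) (out : Int) : Prop :=
  ¬ D_solution boxes → out = solution_alt boxes
instance (boxes : List (List Int)) (out : Int) : Decidable (Spec_solution boxes out) := by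
  unfold Spec_solution; infer_instance

def pvDiffWitness_solution : List (List Int) := [[1000000], [-1]]
def pvDiffWitnessOut_solution : Int × Int := (1, 2)

-- ===== CLAIM (what is proved, stated in full; the proofs are below) =====
def Claim_unchanged_solution : Prop := ∀ (boxes : List (List Int)), Dom_solution boxes →
  Pre_solution boxes → Spec_solution boxes (solution boxes)
def Claim_changed_solution : Prop := Dom_solution (pvDiffWitness_solution) ∧
  Pre_solution (pvDiffWitness_solution) ∧ D_solution (pvDiffWitness_solution) ∧
  solution (pvDiffWitness_solution) = pvDiffWitnessOut_solution.1 ∧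
  solution_alt (pvDiffWitness_solution) = pvDiffWitnessOut_solution.2 ∧
  pvDiffWitnessOut_solution.1 ≠ pvDiffWitnessOut_solution.2
def Claim_exact_solution : Prop := ∀ (boxes : List (List Int)), Dom_solution boxes →
  Pre_solution boxes → D_solution boxes → solution boxes ≠ solution_alt boxes

-- ===== LEMMAS AND PROOFS =====

-- normalized index written by A for label x (Python's negative-index rule)
def pnorm (x : Int) : Int := if x < 0 then x + 1000001 else x

-- number of labels of L landing on array cell r
def ccnt (L : List Int) (r : Int) : Nat := L.countP (fun x => pnorm x == r)

def toggleF (t : Int → Bool) (i : Int) : Int → Bool :=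
  fun r => if r = i then !(t i) else t r

-- number of times A's loop decrements 'answer' on label list L from toggle state t
def cto (t : Int → Bool) : List Int → Nat
  | [] => 0
  | x :: L => (if t (pnorm x) then 1 else 0) + cto (toggleF t (pnorm x)) L

lemma step_eq (a : Int) (t : Int → Bool) (j : Int) :
    solutionStep (a, t) j =
      if t (pnorm j) = true then (a - 1, toggleF t (pnorm j)) else (a, toggleF t (pnorm j)) := by
  unfold solutionStep pnorm toggleF
  cases hv : t (if j < 0 then j + 1000001 else j) <;>
    (simp only [hv, Bool.false_eq_true, Bool.true_eq_false, if_true, if_false,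
      reduceIte, Prod.mk.injEq, true_and, eq_self_iff_true]) <;>
    (first
      | (refine ⟨rfl, ?_⟩) | (refine ?_)) <;>
    funext r <;>
    by_cases hr : r = (if j < 0 then j + 1000001 else j) <;> simp [hr, hv]

lemma foldA (L : List Int) (a : Int) (t : Int → Bool) :
    (L.foldl solutionStep (a, t)).1 = a - cto t L := by
  induction L generalizing a t with
  | nil => simp [cto]
  | cons x L ih =>
    simp only [List.foldl_cons, cto, step_eq]
    by_cases h : t (pnorm x) = true
    · rw [if_pos h, ih]
      simp [h]; push_cast; ring
    · rw [if_neg h, ih]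
      simp only [Bool.not_eq_true] at h
      simp [h]

lemma ccnt_cons (x : Int) (L : List Int) (r : Int) :
    ccnt (x :: L) r = (if pnorm x = r then 1 else 0) + ccnt L r := by
  simp only [ccnt, List.countP_cons]
  by_cases h : pnorm x = r <;> simp [h, Nat.add_comm]

lemma cto_sum (L : List Int) (S : Finset Int) (hS : ∀ x ∈ L, pnorm x ∈ S) (c : Int → Nat) :
    cto (fun r => decide (c r % 2 = 1)) L
      = ∑ r ∈ S, ((c r + ccnt L r) / 2 - c r / 2) := by
  induction L generalizing c with
  | nil =>
    simp [cto, ccnt]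
  | cons x L ih =>
    have hx : pnorm x ∈ S := hS x (by simp)
    have hS' : ∀ y ∈ L, pnorm y ∈ S := fun y hy => hS y (by simp [hy])
    set c' : Int → Nat := fun r => if r = pnorm x then c r + 1 else c r with hc'
    have htog : toggleF (fun r => decide (c r % 2 = 1)) (pnorm x)
        = fun r => decide (c' r % 2 = 1) := by
      funext r
      by_cases hr : r = pnorm x
      · rw [hr]
        rcases Nat.mod_two_eq_zero_or_one (c (pnorm x)) with h | h <;>
          simp [toggleF, hc', h, Nat.add_mod]
      · simp [toggleF, hc', hr]
    have := ih hS' c'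
    simp only [cto, htog, this]
    have key : ∀ r ∈ S, (c' r + ccnt L r) = (c r + ccnt (x :: L) r) := by
      intro r _
      rw [ccnt_cons]
      by_cases hr : r = pnorm x
      · subst hr; simp [hc']; omega
      · rw [if_neg (show pnorm x ≠ r from fun h => hr h.symm)]
        simp [hc', hr]
    have e1 : (fun r => (c' r + ccnt L r) / 2 - c' r / 2) (pnorm x)
        + ∑ r ∈ S.erase (pnorm x), ((c' r + ccnt L r) / 2 - c' r / 2)
        = ∑ r ∈ S, ((c' r + ccnt L r) / 2 - c' r / 2) :=
      Finset.add_sum_erase S (fun r => (c' r + ccnt L r) / 2 - c' r / 2) hx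
    have e2 : (fun r => (c r + ccnt (x :: L) r) / 2 - c r / 2) (pnorm x)
        + ∑ r ∈ S.erase (pnorm x), ((c r + ccnt (x :: L) r) / 2 - c r / 2)
        = ∑ r ∈ S, ((c r + ccnt (x :: L) r) / 2 - c r / 2) :=
      Finset.add_sum_erase S (fun r => (c r + ccnt (x :: L) r) / 2 - c r / 2) hx
    rw [← e1, ← e2]
    have hrest : ∑ r ∈ S.erase (pnorm x), ((c' r + ccnt L r) / 2 - c' r / 2)
        = ∑ r ∈ S.erase (pnorm x), ((c r + ccnt (x :: L) r) / 2 - c r / 2) := by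
      refine Finset.sum_congr rfl (fun r hr => ?_)
      have hne : r ≠ pnorm x := (Finset.mem_erase.mp hr).1
      rw [key r (Finset.mem_of_mem_erase hr)]
      simp [hc', hne]
    rw [hrest]
    have hat : c' (pnorm x) + ccnt L (pnorm x) = c (pnorm x) + ccnt (x :: L) (pnorm x) :=
      key _ hx
    have hc'x : c' (pnorm x) = c (pnorm x) + 1 := by simp [hc']
    by_cases h : c (pnorm x) % 2 = 1 <;> simp [h] <;> omega

-- A's value in closed form: count of labels per array cell, halved, summed.
lemma A_val (boxes : List (List Int)) :
    solution boxes = (boxes.length : Int)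
      - (∑ r ∈ (boxes.flatten.map pnorm).toFinset, ccnt boxes.flatten r / 2 : Nat) := by
  have h0 : solution boxes = (boxes.length : Int)
      - cto (fun _ : Int => false) boxes.flatten := by
    show (boxes.foldl (fun st i => i.foldl solutionStep st)
      ((boxes.length : Int), fun _ : Int => false)).1 = _
    rw [← List.foldl_flatten, foldA]
  have hfalse : (fun _ : Int => false) = fun r => decide ((fun _ : Int => (0 : Nat)) r % 2 = 1) := by
    funext r; simp
  rw [h0, hfalse, cto_sum boxes.flatten ((boxes.flatten.map pnorm).toFinset)
    (fun x hx => by simp only [List.mem_toFinset, List.mem_map]; exact ⟨x, hx, rfl⟩)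
    (fun _ => 0)]
  simp

-- B's adjacent-pair sweep on a (nondecreasing) list counts one pair per two equal copies
lemma pairsScan_pairwise : (M : List Int) → M.Pairwise (· ≤ ·) →
    pairsScan M = ∑ x ∈ M.toFinset, M.count x / 2
  | [], _ => by simp [pairsScan]
  | [a], _ => by simp [pairsScan]
  | a :: b :: t, hs => by
    by_cases h : a = b
    · subst h
      have ht : t.Pairwise (· ≤ ·) := (List.pairwise_cons.mp (List.pairwise_cons.mp hs).2).2
      have ih := pairsScan_pairwise t ht
      have hfs : (a :: a :: t).toFinset = insert a t.toFinset := by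
        ext x; simp
      have hca : (a :: a :: t).count a = t.count a + 2 := by
        simp [List.count_cons]
      have hcx : ∀ x ∈ t.toFinset.erase a, (a :: a :: t).count x = t.count x := by
        intro x hx
        have hne : x ≠ a := (Finset.mem_erase.mp hx).1
        simp [List.count_cons, Ne.symm hne]
      have hmem : a ∈ insert a t.toFinset := Finset.mem_insert_self a _
      have e1 : (fun x => (a :: a :: t).count x / 2) a
          + ∑ x ∈ (insert a t.toFinset).erase a, (a :: a :: t).count x / 2
          = ∑ x ∈ insert a t.toFinset, (a :: a :: t).count x / 2 :=
        Finset.add_sum_erase _ (fun x => (a :: a :: t).count x / 2) hmem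
      have herase : (insert a t.toFinset).erase a = t.toFinset.erase a :=
        Finset.erase_insert_eq_erase _ _
      rw [pairsScan, if_pos rfl, ih, hfs, ← e1, herase]
      have hrest : ∑ x ∈ t.toFinset.erase a, (a :: a :: t).count x / 2
          = ∑ x ∈ t.toFinset.erase a, t.count x / 2 :=
        Finset.sum_congr rfl (fun x hx => by rw [hcx x hx])
      rw [hrest]
      simp only [hca]
      by_cases hat : a ∈ t.toFinset
      · have e2 : t.count a / 2 + ∑ x ∈ t.toFinset.erase a, t.count x / 2
            = ∑ x ∈ t.toFinset, t.count x / 2 :=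
          Finset.add_sum_erase _ (fun x => t.count x / 2) hat
        omega
      · have h0 : t.count a = 0 := List.count_eq_zero.mpr (fun h => hat (List.mem_toFinset.mpr h))
        rw [Finset.erase_eq_of_notMem hat] at *
        omega
    · have hle : ∀ x ∈ b :: t, a ≤ x := fun x hx => (List.pairwise_cons.mp hs).1 x hx
      have hbt : (b :: t).Pairwise (· ≤ ·) := (List.pairwise_cons.mp hs).2
      have ih := pairsScan_pairwise (b :: t) hbt
      have hnot : a ∉ b :: t := by
        intro hmem
        rcases List.mem_cons.mp hmem with hab | hat
        · exact h hab
        · have h1 : a ≤ b := hle b (by simp)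
          have h2 : b ≤ a := (List.pairwise_cons.mp hbt).1 a hat
          exact h (le_antisymm h1 h2)
      have hfs : (a :: b :: t).toFinset = insert a (b :: t).toFinset := by
        ext x; simp
      have hanotfs : a ∉ (b :: t).toFinset := fun hx => hnot (List.mem_toFinset.mp hx)
      rw [pairsScan, if_neg h, ih, hfs, Finset.sum_insert hanotfs]
      have hca : (a :: b :: t).count a = 1 := by
        have h0 : (b :: t).count a = 0 := List.count_eq_zero.mpr hnot
        simp [List.count_cons] at h0 ⊢
        omega
      have hrest : ∑ x ∈ (b :: t).toFinset, (a :: b :: t).count x / 2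
          = ∑ x ∈ (b :: t).toFinset, (b :: t).count x / 2 := by
        refine Finset.sum_congr rfl (fun x hx => ?_)
        have hne : a ≠ x := fun he => hanotfs (he ▸ hx)
        simp [List.count_cons, hne]
      simp only [hca, hrest]
      omega
  termination_by M => M.length

-- B's value in closed form: count of each distinct label, halved, summed.
lemma B_val (boxes : List (List Int)) :
    solution_alt boxes = (boxes.length : Int)
      - (∑ x ∈ boxes.flatten.toFinset, boxes.flatten.count x / 2 : Nat) := by
  set L := boxes.flatten with hL
  set M := PySem.List.sorted L (fun x => x) false with hM
  have hperm : M.Perm L := PySem.List.sorted_perm L (fun x => x) false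
  have hs : M.Pairwise (· ≤ ·) := by
    have := PySem.List.sorted_pairwise L (fun x : Int => x)
    simpa using this
  have h1 : pairsScan M = ∑ x ∈ M.toFinset, M.count x / 2 := pairsScan_pairwise M hs
  have h2 : ∑ x ∈ M.toFinset, M.count x / 2 = ∑ x ∈ L.toFinset, L.count x / 2 := by
    rw [List.toFinset_eq_of_perm M L hperm]
    exact Finset.sum_congr rfl (fun x _ => by rw [hperm.count_eq])
  show (boxes.length : Int) - (pairsScan M : Int) = _
  rw [h1, h2]

-- labels of a class cell, under the in-range precondition
lemma fiber_subset (L : List Int) (hb : ∀ x ∈ L, -1000001 ≤ x ∧ x ≤ 1000000) (r : Int) :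
    L.toFinset.filter (fun x => pnorm x = r) ⊆ {r, r - 1000001} := by
  intro x hx
  obtain ⟨hxL, hxr⟩ := Finset.mem_filter.mp hx
  have hxL' : x ∈ L := List.mem_toFinset.mp hxL
  have hbx := hb x hxL'
  simp only [Finset.mem_insert, Finset.mem_singleton]
  by_cases hneg : x < 0
  · right; simp only [pnorm, if_pos hneg] at hxr; omega
  · left; simp only [pnorm, if_neg hneg] at hxr; omega

lemma count_filter' (L : List Int) (p : Int → Bool) (a : Int) :
    (L.filter p).count a = if p a then L.count a else 0 := by
  induction L with
  | nil => simp
  | cons x L ih =>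
    by_cases hp : p x
    · by_cases hx : x = a <;> simp [List.filter_cons, hp, hx, ih] <;> split_ifs <;> simp_all
    · by_cases hx : x = a <;> simp [List.filter_cons, hp, hx, ih] <;> split_ifs <;> simp_all

lemma ccnt_eq_fiber_sum (L : List Int) (r : Int) :
    ccnt L r = ∑ x ∈ L.toFinset.filter (fun x => pnorm x = r), L.count x := by
  have h1 : ccnt L r = (L.filter (fun x => pnorm x == r)).length :=
    List.countP_eq_length_filter
  have h2 : ∑ a ∈ (L.filter (fun x => pnorm x == r)).toFinset,
      (L.filter (fun x => pnorm x == r)).count a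
      = (L.filter (fun x => pnorm x == r)).length := by
    have := Multiset.toFinset_sum_count_eq ((L.filter (fun x => pnorm x == r)) : Multiset Int)
    simpa using this
  have hset : (L.filter (fun x => pnorm x == r)).toFinset
      = L.toFinset.filter (fun x => pnorm x = r) := by
    ext a; simp [List.mem_filter]
  rw [h1, ← h2, hset]
  refine Finset.sum_congr rfl (fun a ha => ?_)
  have hpa : pnorm a = r := (Finset.mem_filter.mp ha).2
  rw [count_filter']
  simp [hpa]

-- a sum over a subset of an (unordered) pair
lemma sum_pair_subset {P : Finset Int} {u v : Int} (huv : u ≠ v) (hP : P ⊆ {u, v})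
    (f : Int → Nat) :
    ∑ x ∈ P, f x = (if u ∈ P then f u else 0) + (if v ∈ P then f v else 0) := by
  have h1 : ∑ x ∈ P, f x = ∑ x ∈ P, (if x ∈ P then f x else 0) :=
    Finset.sum_congr rfl (fun x hx => by simp [hx])
  rw [h1, Finset.sum_subset hP (fun x _ hx => if_neg hx), Finset.sum_pair huv]

-- fiber membership characterised by positive counts, for a class cell r ∈ [0, 1000000]
lemma fiber_sum_eq (L : List Int) (hb : ∀ x ∈ L, -1000001 ≤ x ∧ x ≤ 1000000) (r : Int)
    (hr0 : 0 ≤ r) (hr1 : r ≤ 1000000) (f : Int → Nat) :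
    ∑ x ∈ L.toFinset.filter (fun x => pnorm x = r), f x
      = (if 0 < L.count r then f r else 0)
        + (if 0 < L.count (r - 1000001) then f (r - 1000001) else 0) := by
  have huv : r ≠ r - 1000001 := by omega
  have hsub : L.toFinset.filter (fun x => pnorm x = r) ⊆ {r, r - 1000001} :=
    fiber_subset L hb r
  rw [sum_pair_subset huv hsub f]
  have hu : r ∈ L.toFinset.filter (fun x => pnorm x = r) ↔ 0 < L.count r := by
    simp only [Finset.mem_filter, List.mem_toFinset, pnorm, if_neg (by omega : ¬ r < 0)]
    constructor
    · exact fun h => List.count_pos_iff.mpr h.1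
    · exact fun h => ⟨List.count_pos_iff.mp h, trivial⟩
  have hv : (r - 1000001) ∈ L.toFinset.filter (fun x => pnorm x = r)
      ↔ 0 < L.count (r - 1000001) := by
    simp only [Finset.mem_filter, List.mem_toFinset, pnorm,
      if_pos (by omega : r - 1000001 < 0)]
    constructor
    · exact fun h => List.count_pos_iff.mpr h.1
    · exact fun h => ⟨List.count_pos_iff.mp h, by omega⟩
  rw [if_congr hu rfl rfl, if_congr hv rfl rfl]

-- every cell reached by pnorm under the label bounds lies in [0, 1000000]
lemma pnorm_range (x : Int) (h1 : -1000001 ≤ x) (h2 : x ≤ 1000000) :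
    0 ≤ pnorm x ∧ pnorm x ≤ 1000000 := by
  unfold pnorm; split_ifs <;> omega

lemma cell_bounds (L : List Int) (hb : ∀ x ∈ L, -1000001 ≤ x ∧ x ≤ 1000000) (r : Int)
    (hr : r ∈ (L.map pnorm).toFinset) : 0 ≤ r ∧ r ≤ 1000000 := by
  obtain ⟨x, hxL, hxr⟩ := List.mem_map.mp (List.mem_toFinset.mp hr)
  obtain ⟨h1, h2⟩ := hb x hxL
  exact hxr ▸ pnorm_range x h1 h2

lemma maps_to_cells (L : List Int) :
    ∀ x ∈ L.toFinset, pnorm x ∈ (L.map pnorm).toFinset := fun x hx => by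
  simp only [List.mem_toFinset, List.mem_map]
  exact ⟨x, List.mem_toFinset.mp hx, rfl⟩

-- the per-class halved count dominates the sum of halved per-label counts …
lemma fiber_div_le (L : List Int) (hb : ∀ x ∈ L, -1000001 ≤ x ∧ x ≤ 1000000) (r : Int)
    (hr0 : 0 ≤ r) (hr1 : r ≤ 1000000) :
    ∑ x ∈ L.toFinset.filter (fun x => pnorm x = r), L.count x / 2 ≤ ccnt L r / 2 := by
  rw [ccnt_eq_fiber_sum, fiber_sum_eq L hb r hr0 hr1, fiber_sum_eq L hb r hr0 hr1]
  split_ifs <;> omega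

-- … with equality when not both labels of the cell have odd count
lemma fiber_div_eq (L : List Int) (hb : ∀ x ∈ L, -1000001 ≤ x ∧ x ≤ 1000000) (r : Int)
    (hr0 : 0 ≤ r) (hr1 : r ≤ 1000000)
    (hpar : L.count r % 2 = 0 ∨ L.count (r - 1000001) % 2 = 0) :
    ccnt L r / 2 = ∑ x ∈ L.toFinset.filter (fun x => pnorm x = r), L.count x / 2 := by
  rw [ccnt_eq_fiber_sum, fiber_sum_eq L hb r hr0 hr1, fiber_sum_eq L hb r hr0 hr1]
  rcases hpar with h | h <;> split_ifs <;> omega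

-- … and strict inequality when both are odd
lemma fiber_div_lt (L : List Int) (hb : ∀ x ∈ L, -1000001 ≤ x ∧ x ≤ 1000000) (r : Int)
    (hr0 : 0 ≤ r) (hr1 : r ≤ 1000000)
    (h1 : L.count r % 2 = 1) (h2 : L.count (r - 1000001) % 2 = 1) :
    ∑ x ∈ L.toFinset.filter (fun x => pnorm x = r), L.count x / 2 < ccnt L r / 2 := by
  rw [ccnt_eq_fiber_sum, fiber_sum_eq L hb r hr0 hr1, fiber_sum_eq L hb r hr0 hr1]
  rw [if_pos (by omega), if_pos (by omega)]
  split_ifs <;> omega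

lemma pre_flat (boxes : List (List Int)) (hpre : Pre_solution boxes) :
    ∀ x ∈ boxes.flatten, -1000001 ≤ x ∧ x ≤ 1000000 := by
  intro x hx
  obtain ⟨b, hb, hxb⟩ := List.mem_flatten.mp hx
  exact hpre b hb x hxb

theorem solution_spec : Claim_unchanged_solution := by
  intro boxes _ hpre hnD
  set L := boxes.flatten with hL
  have hb : ∀ x ∈ L, -1000001 ≤ x ∧ x ≤ 1000000 := pre_flat boxes hpre
  have hfib := Finset.sum_fiberwise_of_maps_to (maps_to_cells L) (fun x => L.count x / 2)
  have hmain : ∑ r ∈ (L.map pnorm).toFinset, ccnt L r / 2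
      = ∑ x ∈ L.toFinset, L.count x / 2 := by
    rw [← hfib]
    refine Finset.sum_congr rfl (fun r hr => ?_)
    obtain ⟨hr0, hr1⟩ := cell_bounds L hb r hr
    refine fiber_div_eq L hb r hr0 hr1 ?_
    by_cases hrL : r ∈ L
    · have hnot : ¬ (L.count r % 2 = 1 ∧ L.count (r - 1000001) % 2 = 1) := by
        intro ⟨ha, hbo⟩
        exact hnD ⟨r, hrL, hr0, ha, hbo⟩
      rcases Nat.mod_two_eq_zero_or_one (L.count r) with h | h
      · exact Or.inl h
      · rcases Nat.mod_two_eq_zero_or_one (L.count (r - 1000001)) with h' | h'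
        · exact Or.inr h'
        · exact absurd ⟨h, h'⟩ hnot
    · exact Or.inl (by simp [List.count_eq_zero.mpr hrL])
  rw [A_val, B_val, ← hL, hmain]

theorem solution_changed : Claim_changed_solution := by
  unfold Claim_changed_solution; decide

theorem solution_tight : Claim_exact_solution := by
  intro boxes _ hpre hD
  set L := boxes.flatten with hL
  have hb : ∀ x ∈ L, -1000001 ≤ x ∧ x ≤ 1000000 := pre_flat boxes hpre
  obtain ⟨x0, hx0L, hx00, hodd1, hodd2⟩ := hD
  have hx0b := hb x0 hx0L
  have hx0n : pnorm x0 = x0 := by unfold pnorm; rw [if_neg (by omega)]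
  have hx0t : x0 ∈ (L.map pnorm).toFinset := by
    simp only [List.mem_toFinset, List.mem_map]
    exact ⟨x0, hx0L, hx0n⟩
  have hfib := Finset.sum_fiberwise_of_maps_to (maps_to_cells L) (fun x => L.count x / 2)
  have hlt : ∑ x ∈ L.toFinset, L.count x / 2
      < ∑ r ∈ (L.map pnorm).toFinset, ccnt L r / 2 := by
    rw [← hfib]
    refine Finset.sum_lt_sum (fun r hr => ?_) ⟨x0, hx0t, ?_⟩
    · obtain ⟨hr0, hr1⟩ := cell_bounds L hb r hr
      exact fiber_div_le L hb r hr0 hr1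
    · exact fiber_div_lt L hb x0 hx00 hx0b.2 hodd1 hodd2
  rw [A_val, B_val, ← hL]
  intro h
  have hc : ((∑ r ∈ (L.map pnorm).toFinset, ccnt L r / 2 : Nat) : Int)
      = ((∑ x ∈ L.toFinset, L.count x / 2 : Nat) : Int) := by omega
  have hn : (∑ r ∈ (L.map pnorm).toFinset, ccnt L r / 2 : Nat)
      = (∑ x ∈ L.toFinset, L.count x / 2 : Nat) := by exact_mod_cast hc
  omega
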